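-- pv_equiv track=rewrite | github.com/emdb-empiar/3dstrudel | threed_strudel/utils/functions.py | split_weighted_dict
-- ===== SOURCE A (Python) =====
-- def split_weighted_dict(dictionary, nr):
--     """
--     From a dictionary ({'ASP': 20, 'GLU': 30, 'PHE': 10, 'ARG': 50, ..)
--     Creates a list of lists of keys of the input dictionary such as in each
--     group the sum of the corresponding values is minimal.
--     :param dictionary:
--     :param nr:
--     :return:
--     """
--     out_list = []
--     weights = []
--     sorted_dict = sorted(dictionary.items(), key=lambda kv: kv[1], reverse=True)
--
--     for key, value in sorted_dict[0:nr]: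
--         out_list.append([key])
--         weights.append(value)
--
--     for key, value in sorted_dict[nr:]:
--         min_index = weights.index(min(weights))
--         out_list[min_index].append(key)
--         weights[min_index] = weights[min_index] + value
--
--     return out_list
-- ===== SOURCE B (Python) =====
-- def _insort(groups, g):
--     """Insert g into groups, kept ascending by (weight, group index);
--     the position is found by a hand-rolled binary search."""
--     key = (g[0], g[1])
--     lo, hi = 0, len(groups)
--     while lo < hi:
--         mid = (lo + hi) // 2
--         if (groups[mid][0], groups[mid][1]) < key:
--             lo = mid + 1
--         else:
--             hi = mid
--     groups.insert(lo, g)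
--
--
-- def split_weighted_dict(dictionary, nr):
--     items = sorted(dictionary.items(), key=lambda kv: kv[1], reverse=True)
--     groups = []
--     for i, (key, value) in enumerate(items[:nr]):
--         _insort(groups, (value, i, [key]))
--     for key, value in items[nr:]:
--         w, i, keys = groups.pop(0)
--         keys.append(key)
--         _insort(groups, (w + value, i, keys))
--     return [g[2] for g in sorted(groups, key=lambda g: g[1])]
-- ===== Notes on version B (the rewrite author's own statement) =====
-- stated objective: alternative
-- what changed: Instead of rescanning the weights list with min()+index() at every step, B keeps the groups in a list ordered ascending by (weight, group index) -- the lightest group is always at the front, and the updated group is re-inserted at a position found by a hand-rolled binary search; the output is recovered at the end by sorting on the group index.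
import Mathlib
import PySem

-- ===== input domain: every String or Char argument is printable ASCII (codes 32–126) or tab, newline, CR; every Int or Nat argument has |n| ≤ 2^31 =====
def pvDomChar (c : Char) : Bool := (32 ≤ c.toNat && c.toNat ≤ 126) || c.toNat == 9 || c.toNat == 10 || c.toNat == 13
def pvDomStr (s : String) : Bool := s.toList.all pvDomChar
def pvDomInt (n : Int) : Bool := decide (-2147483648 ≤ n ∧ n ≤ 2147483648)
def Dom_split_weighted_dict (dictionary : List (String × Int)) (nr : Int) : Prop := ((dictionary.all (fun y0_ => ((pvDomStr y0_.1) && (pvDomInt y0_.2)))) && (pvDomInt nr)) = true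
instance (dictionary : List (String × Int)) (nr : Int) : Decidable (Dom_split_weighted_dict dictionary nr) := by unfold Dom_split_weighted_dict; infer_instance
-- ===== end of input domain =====

-- B replaces A's per-item min()+index() rescan of the weights list by a groups list kept
-- ordered ascending by (weight, group index); same return values, a different data structure.

-- ===== PORT A =====
-- one iteration of A's second loop over state (out_list, weights);
-- min([]) raises ValueError in Python: the 'none' branches are unreachable under Pre_
def AStep (st : List (List String) × List Int) (kv : String × Int) : List (List String) × List Int :=
  match PySem.List.min? st.2 (fun x => x) with
  | none => st
  | some m =>
    match PySem.List.index? st.2 m with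
    | none => st
    | some min_index =>
      (st.1.set min_index (st.1.getD min_index [] ++ [kv.1]),
       st.2.set min_index (st.2.getD min_index 0 + kv.2))

def split_weighted_dict (dictionary : List (String × Int)) (nr : Int) : List (List String) :=
  let sorted_dict := PySem.List.sorted dictionary (fun kv => kv.2) true
  let st0 := (PySem.List.slice sorted_dict (some 0) (some nr)).foldl
      (fun (st : List (List String) × List Int) kv => (st.1 ++ [[kv.1]], st.2 ++ [kv.2])) ([], [])
  let stF := (PySem.List.slice sorted_dict (some nr) none).foldl AStep st0
  stF.1

-- ===== PORT B =====
-- Python tuple comparison (g[0], g[1]) < (h[0], h[1])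
def ltKey (g h : Int × Int × List String) : Bool :=
  g.1 < h.1 || (g.1 == h.1 && g.2.1 < h.2.1)

-- _insort: termination facts for the binary-search midpoint, cited by bisPos
lemma mid_ge {lo hi : Int} (h : lo < hi) : lo ≤ PySem.Int.floordiv (lo + hi) 2 :=
  (PySem.Int.floordiv_two_mid_bounds h.le).1

lemma mid_lt {lo hi : Int} (h : lo < hi) : PySem.Int.floordiv (lo + hi) 2 < hi := by
  rw [PySem.Int.floordiv_lt_iff_lt_mul (by norm_num)]
  omega

-- _insort's while loop: the binary search for the insertion position
def bisPos (gs : List (Int × Int × List String)) (g : Int × Int × List String)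
    (lo hi : Int) : Int :=
  if h : lo < hi then
    let mid := PySem.Int.floordiv (lo + hi) 2
    if ltKey (PySem.List.pyGetD gs mid (0, 0, [])) g then bisPos gs g (mid + 1) hi
    else bisPos gs g lo mid
  else lo
termination_by (hi - lo).toNat
decreasing_by
  · have h1 := mid_ge h; omega
  · have h2 := mid_lt h; omega

-- _insort: groups.insert(lo, g) at the found position
def insortB (groups : List (Int × Int × List String)) (g : Int × Int × List String) :
    List (Int × Int × List String) :=
  PySem.List.insert groups (bisPos groups g 0 groups.length) g

-- one iteration of B's second loop; groups[0] raises IndexError in Python on [],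
-- unreachable under Pre_
def BStep (groups : List (Int × Int × List String)) (kv : String × Int) :
    List (Int × Int × List String) :=
  match groups with
  | [] => []
  | g :: t => insortB t (g.1 + kv.2, g.2.1, g.2.2 ++ [kv.1])

def split_weighted_dict_alt (dictionary : List (String × Int)) (nr : Int) : List (List String) :=
  let items := PySem.List.sorted dictionary (fun kv => kv.2) true
  let gs0 := (PySem.List.enumerate (PySem.List.slice items (some 0) (some nr)) 0).foldl
      (fun gs ikv => insortB gs (ikv.2.2, ikv.1, [ikv.2.1])) []
  let gsF := (PySem.List.slice items (some nr) none).foldl BStep gs0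
  (PySem.List.sorted gsF (fun g => g.2.1) false).map (fun g => g.2.2)

-- ===== PRECONDITION & SPEC =====
-- Pre_ excludes exactly the inputs on which Python A raises (ValueError from min([])):
-- leftover items with no seed group, i.e. a non-empty dict with nr = 0, or a negative nr
-- with len(dictionary) <= -nr.  B raises there too (IndexError on groups[0]).
def Pre_split_weighted_dict (dictionary : List (String × Int)) (nr : Int) : Prop :=
  dictionary = [] ∨ 1 ≤ nr ∨ (nr < 0 ∧ 1 ≤ (dictionary.length : Int) + nr)
instance (dictionary : List (String × Int)) (nr : Int) : Decidable (Pre_split_weighted_dict dictionary nr) := by unfold Pre_split_weighted_dict; infer_instance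
def pvWitness_split_weighted_dict : (List (String × Int)) × Int := ([("ASP", 20), ("GLU", 30), ("PHE", 10)], 2)

def Spec_split_weighted_dict (dictionary : List (String × Int)) (nr : Int) (out : List (List String)) : Prop := out = split_weighted_dict_alt dictionary nr
instance (dictionary : List (String × Int)) (nr : Int) (out : List (List String)) : Decidable (Spec_split_weighted_dict dictionary nr out) := by unfold Spec_split_weighted_dict; infer_instance

-- ===== CLAIM (what is proved, stated in full; the proofs are below) =====
def Claim_equal_split_weighted_dict : Prop := ∀ (dictionary : List (String × Int)) (nr : Int), Dom_split_weighted_dict dictionary nr → Pre_split_weighted_dict dictionary nr → Spec_split_weighted_dict dictionary nr (split_weighted_dict dictionary nr)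

-- ===== LEMMAS AND PROOFS =====

-- the Prop order behind ltKey (strict lexicographic on (weight, group index))
def ltP (g h : Int × Int × List String) : Prop := g.1 < h.1 ∨ (g.1 = h.1 ∧ g.2.1 < h.2.1)

-- the abstract state: group i of A's state (out, ws) as B's triple (weight, index, keys)
def Zp (ws : List Int) (out : List (List String)) : List (Int × Int × List String) :=
  (List.range ws.length).map (fun i => (ws.getD i 0, (i : Int), out.getD i []))

lemma ltKey_iff (g h : Int × Int × List String) : ltKey g h = true ↔ ltP g h := by
  simp [ltKey, ltP]

lemma ltP_trans {a b c : Int × Int × List String} (h1 : ltP a b) (h2 : ltP b c) : ltP a c := by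
  rcases h1 with h1 | ⟨e1, l1⟩ <;> rcases h2 with h2 | ⟨e2, l2⟩ <;> unfold ltP <;> omega

lemma ltP_total {a b : Int × Int × List String} (hne : a.2.1 ≠ b.2.1) (h : ¬ ltP a b) : ltP b a := by
  unfold ltP at *; omega

lemma bisPos_inv (gs : List (Int × Int × List String)) (g : Int × Int × List String)
    (hp : gs.Pairwise ltP) :
    ∀ (n : Nat) (lo hi : Int), (hi - lo).toNat ≤ n → 0 ≤ lo → lo ≤ hi → hi ≤ (gs.length : Int) →
    (∀ k : Nat, (k : Int) < lo → ∀ hk : k < gs.length, ltP gs[k] g) →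
    (∀ k : Nat, hi ≤ (k : Int) → ∀ hk : k < gs.length, ¬ ltP gs[k] g) →
    ∃ p : Nat, bisPos gs g lo hi = (p : Int) ∧ lo ≤ (p : Int) ∧ (p : Int) ≤ hi ∧
      (∀ k : Nat, k < p → ∀ hk : k < gs.length, ltP gs[k] g) ∧
      (∀ k : Nat, p ≤ k → ∀ hk : k < gs.length, ¬ ltP gs[k] g) := by
  have hget := List.pairwise_iff_getElem.mp hp
  intro n
  induction n with
  | zero =>
    intro lo hi hn h0 hlh hhi hlo' hhi'
    have : lo = hi := by omega
    subst this
    rw [bisPos, dif_neg (by omega)]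
    refine ⟨lo.toNat, by omega, by omega, by omega, ?_, ?_⟩
    · intro k hk hkl; exact hlo' k (by omega) hkl
    · intro k hk hkl; exact hhi' k (by omega) hkl
  | succ n ih =>
    intro lo hi hn h0 hlh hhi hlo' hhi'
    by_cases h : lo < hi
    · rw [bisPos, dif_pos h]
      simp only []
      set mid := PySem.Int.floordiv (lo + hi) 2 with hmid
      have hm1 : lo ≤ mid := mid_ge h
      have hm2 : mid < hi := mid_lt h
      have hmlen : mid.toNat < gs.length := by omega
      have hgetmid : PySem.List.pyGetD gs mid (0, 0, []) = gs[mid.toNat] := by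
        rw [PySem.List.pyGetD_of_nonneg gs _ (by omega)]
        simp [List.getD_eq_getElem?_getD, List.getElem?_eq_getElem hmlen]
      by_cases hc : ltP gs[mid.toNat] g
      · rw [if_pos (by rw [hgetmid, ltKey_iff]; exact hc)]
        have hlo2 : ∀ k : Nat, (k : Int) < mid + 1 → ∀ hk : k < gs.length, ltP gs[k] g := by
          intro k hk hkl
          rcases Nat.lt_or_ge k mid.toNat with hkm | hkm
          · exact ltP_trans (hget k mid.toNat hkl hmlen hkm) hc
          · have : k = mid.toNat := by omega
            subst this; exact hc
        obtain ⟨p, e1, e2, e3, e4, e5⟩ := ih (mid + 1) hi (by omega) (by omega) (by omega) hhi hlo2 hhi'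
        exact ⟨p, e1, by omega, e3, e4, e5⟩
      · rw [if_neg (by rw [hgetmid, ltKey_iff]; simpa using hc)]
        have hhi2 : ∀ k : Nat, mid ≤ (k : Int) → ∀ hk : k < gs.length, ¬ ltP gs[k] g := by
          intro k hk hkl hcon
          rcases Nat.lt_or_ge mid.toNat k with hkm | hkm
          · exact hc (ltP_trans (hget mid.toNat k hmlen hkl hkm) hcon)
          · have : k = mid.toNat := by omega
            subst this; exact hc hcon
        obtain ⟨p, e1, e2, e3, e4, e5⟩ := ih lo mid (by omega) h0 (by omega) (by omega) hlo' hhi2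
        exact ⟨p, e1, e2, by omega, e4, e5⟩
    · rw [bisPos, dif_neg h]
      have : lo = hi := by omega
      subst this
      refine ⟨lo.toNat, by omega, by omega, by omega, ?_, ?_⟩
      · intro k hk hkl; exact hlo' k (by omega) hkl
      · intro k hk hkl; exact hhi' k (by omega) hkl

lemma insortB_split (gs : List (Int × Int × List String)) (g : Int × Int × List String)
    (hp : gs.Pairwise ltP) :
    ∃ p : Nat, p ≤ gs.length ∧ insortB gs g = gs.take p ++ g :: gs.drop p ∧
      (∀ k : Nat, k < p → ∀ hk : k < gs.length, ltP gs[k] g) ∧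
      (∀ k : Nat, p ≤ k → ∀ hk : k < gs.length, ¬ ltP gs[k] g) := by
  obtain ⟨p, heq, h1, h2, hbef, haft⟩ := bisPos_inv gs g hp (gs.length : Nat) 0 (gs.length : Int)
    (by omega) (by omega) (by omega) (by omega)
    (by intro k hk hkl; omega) (by intro k hk hkl; omega)
  refine ⟨p, by omega, ?_, hbef, haft⟩
  rw [insortB, heq, PySem.List.insert_natCast gs p g (by omega)]

lemma insortB_perm (gs : List (Int × Int × List String)) (g)
    (hp : gs.Pairwise ltP) :
    (insortB gs g).Perm (g :: gs) := by
  obtain ⟨p, hple, hsplit, _, _⟩ := insortB_split gs g hp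
  rw [hsplit]
  have := List.perm_middle (a := g) (l₁ := gs.take p) (l₂ := gs.drop p)
  rwa [List.take_append_drop] at this

lemma insortB_pairwise {gs : List (Int × Int × List String)} {g}
    (hp : gs.Pairwise ltP) (hfresh : ∀ e ∈ gs, e.2.1 ≠ g.2.1) :
    (insortB gs g).Pairwise ltP := by
  obtain ⟨p, hple, hsplit, hbef, haft⟩ := insortB_split gs g hp
  rw [hsplit]
  have hget := List.pairwise_iff_getElem.mp hp
  rw [List.pairwise_append]
  refine ⟨hp.sublist (List.take_sublist _ _), ?_, ?_⟩
  · rw [List.pairwise_cons]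
    refine ⟨?_, hp.sublist (List.drop_sublist _ _)⟩
    intro e he
    rcases List.getElem_of_mem he with ⟨j, hj, rfl⟩
    rw [List.getElem_drop]
    have hjl : p + j < gs.length := by simp [List.length_drop] at hj; omega
    refine ltP_total ?_ (haft (p + j) (by omega) hjl)
    exact fun hc => hfresh _ (List.getElem_mem hjl) hc
  · intro a ha b hb
    rcases List.getElem_of_mem ha with ⟨k, hk, rfl⟩
    have hkp : k < p := by simp [List.length_take] at hk; omega
    have hkl : k < gs.length := by omega
    rw [List.getElem_take]
    rcases List.mem_cons.mp hb with rfl | hb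
    · exact hbef k hkp hkl
    · rcases List.getElem_of_mem hb with ⟨j, hj, rfl⟩
      rw [List.getElem_drop]
      have hjl : p + j < gs.length := by simp [List.length_drop] at hj; omega
      exact hget k (p + j) hkl hjl (by omega)

lemma length_Zp (ws : List Int) (out : List (List String)) : (Zp ws out).length = ws.length := by
  simp [Zp]

lemma mem_Zp {ws : List Int} {out : List (List String)} {y} :
    y ∈ Zp ws out ↔ ∃ i, i < ws.length ∧ y = (ws.getD i 0, (i : Int), out.getD i []) := by
  simp [Zp, eq_comm]

lemma getElem_Zp {ws : List Int} {out : List (List String)} {i : Nat} (hi : i < ws.length) :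
    (Zp ws out)[i]'(by simpa [length_Zp]) = (ws.getD i 0, (i : Int), out.getD i []) := by
  simp [Zp]

lemma Zp_set {ws : List Int} {out : List (List String)} {i : Nat}
    (hlen : ws.length = out.length) (hi : i < ws.length)
    (a : Int) (b : List String) :
    Zp (ws.set i a) (out.set i b) = (Zp ws out).set i (a, (i : Int), b) := by
  unfold Zp
  apply List.ext_getElem
  · simp
  · intro j hj hj2
    simp only [List.getElem_map, List.getElem_range] at *
    rw [List.getElem_set]
    by_cases h : i = j
    · subst h
      simp [List.getD_eq_getElem?_getD, hi, hlen ▸ hi]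
    · simp [h, List.getD_eq_getElem?_getD, List.getElem?_set_ne h]

lemma Zp_append (ws : List Int) (out : List (List String)) (a : Int) (b : List String)
    (hlen : ws.length = out.length) :
    Zp (ws ++ [a]) (out ++ [b]) = Zp ws out ++ [(a, (ws.length : Int), b)] := by
  unfold Zp
  apply List.ext_getElem
  · simp
  · intro j hj hj2
    rcases Nat.lt_or_ge j ws.length with h | h
    · rw [List.getElem_append_left (by simpa)]
      simp [List.getD_eq_getElem?_getD, List.getElem?_append_left, h, hlen ▸ h]
    · have hj' : j = ws.length := by simp at hj; omega
      subst hj'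
      rw [List.getElem_append_right (by simp)]
      simp [List.getD_eq_getElem?_getD, hlen]

-- A's argmin step matched against the head of B's ordered list
lemma head_min {ws : List Int} {out : List (List String)} {g : Int × Int × List String} {t}
    (hlen : ws.length = out.length) (hne : ws ≠ [])
    (hp : (g :: t).Pairwise ltP) (hperm : (g :: t).Perm (Zp ws out)) :
    ∃ j : Nat, g.2.1 = (j : Int) ∧ j < ws.length ∧ ws.getD j 0 = g.1 ∧ out.getD j [] = g.2.2 ∧
      PySem.List.min? ws (fun x => x) = some g.1 ∧ PySem.List.index? ws g.1 = some j ∧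
      t.Perm ((Zp ws out).eraseIdx j) ∧ (∀ e ∈ t, e.2.1 ≠ g.2.1) := by
  rcases List.pairwise_cons.mp hp with ⟨hhead, htail⟩
  have hdom : ∀ e ∈ Zp ws out, e = g ∨ ltP g e := by
    intro e he
    rcases List.mem_cons.mp (hperm.symm.mem_iff.mp he) with h | h
    · exact Or.inl h
    · exact Or.inr (hhead e h)
  have hg : g ∈ Zp ws out := hperm.mem_iff.mp (by simp)
  rcases mem_Zp.mp hg with ⟨j, hj, hgj⟩
  refine ⟨j, by rw [hgj], hj, by rw [hgj], by rw [hgj], ?_, ?_, ?_, ?_⟩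
  · have hle : ∀ y ∈ ws, g.1 ≤ y := by
      intro y hy
      rcases List.getElem_of_mem hy with ⟨i, hi, rfl⟩
      have hmem : (ws.getD i 0, (i : Int), out.getD i []) ∈ Zp ws out := mem_Zp.mpr ⟨i, hi, rfl⟩
      rcases hdom _ hmem with he | hlt
      · rw [← he]; simp [List.getD_eq_getElem?_getD, List.getElem?_eq_getElem hi]
      · have : g.1 ≤ ws.getD i 0 := by rcases hlt with h | ⟨h, _⟩; omega; omega
        simpa [List.getD_eq_getElem?_getD, List.getElem?_eq_getElem hi] using this
    cases hmin : PySem.List.min? ws (fun x => x) with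
    | none => exact absurd ((PySem.List.min?_eq_none_iff ws _).mp hmin) hne
    | some m =>
      have h1 : m ≤ g.1 := by
        have := PySem.List.min?_isMin hmin (ws.getD j 0) (by
          rw [List.getD_eq_getElem?_getD, List.getElem?_eq_getElem hj]; exact List.getElem_mem hj)
        rw [hgj]; simpa using this
      have h2 : g.1 ≤ m := hle m (PySem.List.min?_mem hmin)
      rw [le_antisymm h1 h2]
  · rw [PySem.List.index?_eq_some_iff]
    refine ⟨ws.take j, ws.drop (j + 1), ?_, by simp [List.length_take]; omega, ?_⟩
    · have hwj : ws[j] = g.1 := by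
        rw [hgj]; simp [List.getD_eq_getElem?_getD, List.getElem?_eq_getElem hj]
      rw [← hwj, List.getElem_cons_drop hj, List.take_append_drop]
    · intro hmem
      rcases List.getElem_of_mem hmem with ⟨i, hi, hieq⟩
      have hilt : i < j := by simp [List.length_take] at hi; omega
      have hiw : i < ws.length := by simp [List.length_take] at hi; omega
      rw [List.getElem_take] at hieq
      have hmemZ : (ws.getD i 0, (i : Int), out.getD i []) ∈ Zp ws out := mem_Zp.mpr ⟨i, hiw, rfl⟩
      have hwsi : ws.getD i 0 = g.1 := by
        rw [← hieq]; simp [List.getD_eq_getElem?_getD, List.getElem?_eq_getElem hiw]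
      rcases hdom _ hmemZ with he | hlt
      · have : (i : Int) = g.2.1 := by rw [← he]
        rw [hgj] at this; simp at this; omega
      · rcases hlt with h | ⟨h, h2⟩
        · omega
        · have : g.2.1 = (j : Int) := by rw [hgj]
          rw [this] at h2
          have : (j : Int) < (i : Int) := h2
          omega
  · have hjZ : j < (Zp ws out).length := by rw [length_Zp]; exact hj
    have hZj : (Zp ws out)[j]'hjZ = g := by rw [getElem_Zp hj, hgj]
    have hsplit : Zp ws out = (Zp ws out).take j ++ g :: (Zp ws out).drop (j + 1) := by
      rw [← hZj, List.getElem_cons_drop hjZ, List.take_append_drop]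
    have hmid : (Zp ws out).Perm (g :: (Zp ws out).eraseIdx j) := by
      rw [List.eraseIdx_eq_take_drop_succ]
      conv_lhs => rw [hsplit]
      exact List.perm_middle
    exact (hperm.trans hmid).cons_inv
  · intro e he hc
    have heZ : e ∈ Zp ws out := hperm.mem_iff.mp (by simp [he])
    rcases mem_Zp.mp heZ with ⟨i, hi, rfl⟩
    simp only at hc
    have : g = (ws.getD i 0, (i : Int), out.getD i []) := by
      rw [hgj]
      have : (j : Int) = (i : Int) := by
        have hg2 : g.2.1 = (j : Int) := by rw [hgj]
        rw [← hg2, ← hc]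
      have hji : j = i := by omega
      subst hji; rfl
    have hlt := hhead _ he
    rw [← this] at hlt
    exact absurd hlt (by simp [ltP])

lemma set_perm_cons_eraseIdx {α : Type} (l : List α) (j : Nat) (v : α) (hj : j < l.length) :
    (l.set j v).Perm (v :: l.eraseIdx j) := by
  rw [List.set_eq_take_append_cons_drop, if_pos hj, List.eraseIdx_eq_take_drop_succ]
  exact List.perm_middle

-- one step of the two second loops preserves the simulation
lemma step_rel {ws : List Int} {out : List (List String)} {gs} (kv : String × Int)
    (hlen : ws.length = out.length) (hne : ws ≠ [])
    (hp : gs.Pairwise ltP) (hperm : gs.Perm (Zp ws out)) :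
    (AStep (out, ws) kv).2.length = ws.length ∧
    (AStep (out, ws) kv).1.length = out.length ∧
    (BStep gs kv).Pairwise ltP ∧
    (BStep gs kv).Perm (Zp (AStep (out, ws) kv).2 (AStep (out, ws) kv).1) := by
  match gs with
  | [] =>
    exfalso
    have := hperm.length_eq
    rw [length_Zp] at this
    simp at this
    exact hne (List.length_eq_zero_iff.mp this.symm)
  | g :: t =>
    rcases head_min hlen hne hp hperm with ⟨j, hgj, hj, hwj, hoj, hmin, hidx, htperm, hfresh⟩
    have hA : AStep (out, ws) kv =
        (out.set j (out.getD j [] ++ [kv.1]), ws.set j (ws.getD j 0 + kv.2)) := by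
      simp only [AStep, hmin, hidx]
    rw [hA]
    refine ⟨by simp, by simp, ?_, ?_⟩
    · rcases List.pairwise_cons.mp hp with ⟨hhead, htail⟩
      exact insortB_pairwise (g := (g.1 + kv.2, g.2.1, g.2.2 ++ [kv.1])) htail
        (fun e he => hfresh e he)
    · have hZ : Zp (ws.set j (ws.getD j 0 + kv.2)) (out.set j (out.getD j [] ++ [kv.1]))
          = (Zp ws out).set j (ws.getD j 0 + kv.2, (j : Int), out.getD j [] ++ [kv.1]) :=
        Zp_set hlen hj _ _
      simp only [BStep, hZ]
      have hjZ : j < (Zp ws out).length := by rw [length_Zp]; exact hj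
      refine ((insortB_perm _ _ (List.pairwise_cons.mp hp).2).trans ?_).trans (set_perm_cons_eraseIdx _ j _ hjZ).symm
      have hg' : (g.1 + kv.2, g.2.1, g.2.2 ++ [kv.1])
          = (ws.getD j 0 + kv.2, (j : Int), out.getD j [] ++ [kv.1]) := by
        rw [← hwj, ← hoj, hgj]
      rw [hg']
      exact (htperm.cons _)

-- the whole second loop preserves the simulation
lemma loop_rel (rest : List (String × Int)) :
    ∀ (out : List (List String)) (ws : List Int) (gs : List (Int × Int × List String)),
    ws.length = out.length → (rest = [] ∨ ws ≠ []) →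
    gs.Pairwise ltP → gs.Perm (Zp ws out) →
    (rest.foldl AStep (out, ws)).2.length = (rest.foldl AStep (out, ws)).1.length ∧
    (rest.foldl BStep gs).Pairwise ltP ∧
    (rest.foldl BStep gs).Perm (Zp (rest.foldl AStep (out, ws)).2 (rest.foldl AStep (out, ws)).1) := by
  induction rest with
  | nil => intro out ws gs hlen _ hp hperm; exact ⟨hlen, hp, hperm⟩
  | cons kv rest ih =>
    intro out ws gs hlen hne hp hperm
    have hne' : ws ≠ [] := by
      rcases hne with h | h
      · exact absurd h (by simp)
      · exact h
    rcases step_rel kv hlen hne' hp hperm with ⟨h1, h2, h3, h4⟩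
    simp only [List.foldl_cons]
    have hst : AStep (out, ws) kv = ((AStep (out, ws) kv).1, (AStep (out, ws) kv).2) := rfl
    rw [hst]
    refine ih _ _ _ (by rw [h1, h2, hlen]) ?_ h3 h4
    right
    intro hc
    rw [hc] at h1
    simp at h1
    exact hne' (List.length_eq_zero_iff.mp h1.symm)

-- A's first loop is the two maps
lemma init_A (seeds : List (String × Int)) :
    seeds.foldl (fun (st : List (List String) × List Int) kv => (st.1 ++ [[kv.1]], st.2 ++ [kv.2])) ([], [])
      = (seeds.map (fun kv => [kv.1]), seeds.map (fun kv => kv.2)) := by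
  have h : ∀ (l : List (String × Int)) (a : List (List String)) (b : List Int),
      l.foldl (fun (st : List (List String) × List Int) kv => (st.1 ++ [[kv.1]], st.2 ++ [kv.2])) (a, b)
        = (a ++ l.map (fun kv => [kv.1]), b ++ l.map (fun kv => kv.2)) := by
    intro l
    induction l with
    | nil => simp
    | cons x xs ih => intro a b; simp [List.foldl_cons, ih]
  simpa using h seeds [] []

-- B's first loop builds an ordered permutation of A's seed state
lemma init_B_aux (seeds : List (String × Int)) :
    ∀ (ws : List Int) (out : List (List String)) (gs : List (Int × Int × List String)),
    ws.length = out.length → gs.Pairwise ltP → gs.Perm (Zp ws out) →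
    (((PySem.List.enumerate seeds (ws.length : Int)).foldl
        (fun gs ikv => insortB gs (ikv.2.2, ikv.1, [ikv.2.1])) gs).Pairwise ltP ∧
     ((PySem.List.enumerate seeds (ws.length : Int)).foldl
        (fun gs ikv => insortB gs (ikv.2.2, ikv.1, [ikv.2.1])) gs).Perm
        (Zp (ws ++ seeds.map (fun kv => kv.2)) (out ++ seeds.map (fun kv => [kv.1])))) := by
  induction seeds with
  | nil => intro ws out gs hlen hp hperm; simpa [PySem.List.enumerate] using ⟨hp, hperm⟩
  | cons x xs ih =>
    intro ws out gs hlen hp hperm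
    rw [PySem.List.enumerate_cons]
    simp only [List.foldl_cons]
    have hfresh : ∀ e ∈ gs, e.2.1 ≠ ((ws.length : Int)) := by
      intro e he hc
      rcases mem_Zp.mp (hperm.mem_iff.mp he) with ⟨i, hi, rfl⟩
      simp at hc; omega
    have hp' : (insortB gs (x.2, (ws.length : Int), [x.1])).Pairwise ltP :=
      insortB_pairwise hp (g := (x.2, (ws.length : Int), [x.1])) hfresh
    have hperm' : (insortB gs (x.2, (ws.length : Int), [x.1])).Perm
        (Zp (ws ++ [x.2]) (out ++ [[x.1]])) := by
      rw [Zp_append ws out x.2 [x.1] hlen]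
      exact (insortB_perm gs _ hp).trans ((hperm.cons _).trans (List.perm_append_singleton _ _).symm)
    have hlen' : (ws ++ [x.2]).length = (out ++ [[x.1]]).length := by simp [hlen]
    have := ih (ws ++ [x.2]) (out ++ [[x.1]]) _ hlen' hp' hperm'
    simpa [List.length_append, add_comm] using this

lemma init_B (seeds : List (String × Int)) :
    ((PySem.List.enumerate seeds 0).foldl (fun gs ikv => insortB gs (ikv.2.2, ikv.1, [ikv.2.1])) []).Pairwise ltP ∧
    ((PySem.List.enumerate seeds 0).foldl (fun gs ikv => insortB gs (ikv.2.2, ikv.1, [ikv.2.1])) []).Perm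
      (Zp (seeds.map (fun kv => kv.2)) (seeds.map (fun kv => [kv.1]))) := by
  have := init_B_aux seeds [] [] [] rfl (by simp) (by simp [Zp])
  simpa using this

-- recovering A's group order from B's ordered list
lemma final_extract {ws : List Int} {out : List (List String)} {gs}
    (hlen : ws.length = out.length) (hperm : gs.Perm (Zp ws out)) :
    (PySem.List.sorted gs (fun g => g.2.1) false).map (fun g => g.2.2) = out := by
  have hpw : (Zp ws out).Pairwise (fun a b => a.2.1 < b.2.1) := by
    unfold Zp
    refine List.pairwise_map.mpr ?_
    refine List.Pairwise.imp ?_ (List.pairwise_lt_range)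
    intro a b h; simpa using h
  have hs := PySem.List.sorted_eq_of_perm_of_pairwise_lt gs (Zp ws out)
    (fun g : Int × Int × List String => g.2.1) hperm.symm hpw
  rw [hs]
  unfold Zp
  rw [List.map_map]
  apply List.ext_getElem
  · simp [hlen]
  · intro i h1 h2
    simp [List.getD_eq_getElem?_getD]
    rw [List.getElem?_eq_getElem h2]
    rfl

-- under Pre_, a non-empty remainder implies a non-empty seed state
lemma seeds_nonempty {dictionary : List (String × Int)} {nr : Int}
    (hpre : Pre_split_weighted_dict dictionary nr) :
    PySem.List.slice (PySem.List.sorted dictionary (fun kv => kv.2) true) (some nr) none = []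
      ∨ (PySem.List.slice (PySem.List.sorted dictionary (fun kv => kv.2) true) (some 0) (some nr)).map (fun kv => kv.2) ≠ [] := by
  set sd := PySem.List.sorted dictionary (fun kv => kv.2) true with hsd
  have hlen : sd.length = dictionary.length := PySem.List.length_sorted dictionary _ true
  have hseedlen : (PySem.List.slice sd (some 0) (some nr)).length
      = PySem.List.clampIdx sd.length nr - PySem.List.clampIdx sd.length 0 := PySem.List.length_slice sd 0 nr
  have hc0 : PySem.List.clampIdx sd.length (0 : Int) = 0 := by
    simp
  rw [hc0, Nat.sub_zero] at hseedlen
  have hrest : PySem.List.slice sd (some nr) none = List.drop (PySem.List.clampIdx sd.length nr) sd :=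
    PySem.List.slice_some_none sd nr
  by_cases hr : List.drop (PySem.List.clampIdx sd.length nr) sd = []
  · exact Or.inl (by rw [hrest]; exact hr)
  · right
    have hdl : PySem.List.clampIdx sd.length nr < sd.length := by
      by_contra hge
      exact hr (List.drop_eq_nil_of_le (by omega))
    have hpos : 0 < PySem.List.clampIdx sd.length nr := by
      rcases hpre with h | h | ⟨hneg, hbound⟩
      · exfalso
        have hz : sd.length = 0 := by rw [hlen, h]; rfl
        omega
      · have : nr = ((nr.toNat : Nat) : Int) := by omega
        rw [this, PySem.List.clampIdx_natCast]
        omega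
      · have : nr = -((nr.natAbs : Nat) : Int) := by omega
        rw [this, PySem.List.clampIdx_neg_natCast _ _ (by omega)]
        omega
    intro hc
    have := congrArg List.length hc
    simp only [List.length_map, hseedlen, List.length_nil] at this
    omega

-- ===== VERDICT (by name: the statement is the Claim_ definition above) =====
theorem split_weighted_dict_spec : Claim_equal_split_weighted_dict := by
  intro dictionary nr _ hpre
  unfold Spec_split_weighted_dict split_weighted_dict split_weighted_dict_alt
  simp only []
  rw [init_A]
  obtain ⟨hp0, hperm0⟩ := init_B (PySem.List.slice (PySem.List.sorted dictionary (fun kv => kv.2) true) (some 0) (some nr))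
  obtain ⟨hl, hp, hperm⟩ := loop_rel _ _ _ _ (by simp) (seeds_nonempty hpre) hp0 hperm0
  exact (final_extract hl hperm).symm
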